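-- pv_equiv track=rewrite | github.com/Olegas/advent-of-code-2019 | day16.py | apply_pattern
-- ===== SOURCE A (Python) =====
-- def apply_pattern(numbers: list, pattern: list, step: int) -> int:
--     result = 0
--     ptr_len = len(pattern)
--     for idx in range(step, len(numbers)):
--         p_idx = idx % ptr_len
--         p = pattern[p_idx]
--         result += numbers[idx] * p
--     return abs(result) % 10
-- ===== SOURCE B (Python) =====
-- def apply_pattern(numbers: list, pattern: list, step: int) -> int:
--     ptr_len = len(pattern)
--     group_sum = [0] * ptr_len
--     for idx in range(step, len(numbers)):
--         group_sum[idx % ptr_len] += numbers[idx]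
--     result = sum(p * g for p, g in zip(pattern, group_sum))
--     return abs(result) % 10
-- ===== Notes on version B (the rewrite author's own statement) =====
-- stated objective: alternative
-- what changed: Replaced the fused multiply-accumulate loop by a grouping pass that accumulates per-residue sums into a bucket list, followed by a separate dot product of the pattern with the buckets.
import Mathlib
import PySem

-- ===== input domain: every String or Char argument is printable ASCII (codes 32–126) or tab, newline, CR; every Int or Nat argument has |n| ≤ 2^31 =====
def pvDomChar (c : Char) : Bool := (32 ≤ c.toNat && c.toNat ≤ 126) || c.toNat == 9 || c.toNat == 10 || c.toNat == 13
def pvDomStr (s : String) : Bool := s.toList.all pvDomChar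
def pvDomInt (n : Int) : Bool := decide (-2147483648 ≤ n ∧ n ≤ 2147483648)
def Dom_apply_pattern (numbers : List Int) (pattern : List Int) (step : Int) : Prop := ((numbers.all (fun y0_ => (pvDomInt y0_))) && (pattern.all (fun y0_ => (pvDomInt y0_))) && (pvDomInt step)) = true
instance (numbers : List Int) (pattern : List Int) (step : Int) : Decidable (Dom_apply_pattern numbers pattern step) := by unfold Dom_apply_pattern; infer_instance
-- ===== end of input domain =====

-- B replaces A's fused multiply-accumulate loop by a per-residue grouping pass plus a zip dot
-- product with the pattern (objective: alternative decomposition, same cost).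


-- ===== PORT A =====
-- literal transliteration of A; numbers[idx] / pattern[p_idx] are PySem.List.pyGet? with
-- a .getD 0 that Pre_ guarantees is never taken (Python would raise there).
def apply_pattern (numbers : List Int) (pattern : List Int) (step : Int) : Int :=
  let ptr_len : Int := (pattern.length : Int)
  let result : Int :=
    (PySem.List.pyRange step (numbers.length : Int) 1).foldl
      (fun result idx =>
        let p_idx := PySem.Int.mod idx ptr_len
        let p := (PySem.List.pyGet? pattern p_idx).getD 0
        result + ((PySem.List.pyGet? numbers idx).getD 0) * p)
      0
  ((result.natAbs : Int)) % 10

-- ===== PORT B =====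
-- transliteration of Source B: grouping pass into a bucket list, then zip dot product.
-- idx % ptr_len is ≥ 0 in Python (the divisor ptr_len is positive under Pre_ whenever the
-- loop runs), so .toNat is exact here.
def apply_pattern_alt (numbers : List Int) (pattern : List Int) (step : Int) : Int :=
  let ptr_len : Nat := pattern.length
  let group_sum : List Int :=
    (PySem.List.pyRange step (numbers.length : Int) 1).foldl
      (fun g idx =>
        let k := (PySem.Int.mod idx (ptr_len : Int)).toNat
        g.set k (g.getD k 0 + (PySem.List.pyGet? numbers idx).getD 0))
      (List.replicate ptr_len 0)
  let result : Int := (List.zipWith (fun p g => p * g) pattern group_sum).sum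
  ((result.natAbs : Int)) % 10

-- ===== PRECONDITION & SPEC =====
-- Pre_ excludes exactly the inputs where Python A raises: an empty pattern with a nonempty
-- loop range (ZeroDivisionError), or step < -len(numbers) (IndexError on numbers[idx]).
def Pre_apply_pattern (numbers : List Int) (pattern : List Int) (step : Int) : Prop :=
  (numbers.length : Int) ≤ step ∨ (pattern ≠ [] ∧ -(numbers.length : Int) ≤ step)
instance (numbers : List Int) (pattern : List Int) (step : Int) : Decidable (Pre_apply_pattern numbers pattern step) := by unfold Pre_apply_pattern; infer_instance
def pvWitness_apply_pattern : List Int × List Int × Int := ([3, -1, 4, 1, 5], [1, 0, -1], 1)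

def Spec_apply_pattern (numbers : List Int) (pattern : List Int) (step : Int) (out : Int) : Prop := out = apply_pattern_alt numbers pattern step
instance (numbers : List Int) (pattern : List Int) (step : Int) (out : Int) : Decidable (Spec_apply_pattern numbers pattern step out) := by unfold Spec_apply_pattern; infer_instance

-- ===== CLAIM (what is proved, stated in full; the proofs are below) =====
def Claim_equal_apply_pattern : Prop := ∀ (numbers : List Int) (pattern : List Int) (step : Int), Dom_apply_pattern numbers pattern step → Pre_apply_pattern numbers pattern step → Spec_apply_pattern numbers pattern step (apply_pattern numbers pattern step)

-- ===== LEMMAS AND PROOFS =====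

-- dot product of the pattern with an all-zero bucket list is 0
lemma zip_mul_replicate_zero (pat : List Int) (n : Nat) :
    (List.zipWith (fun p g => p * g) pat (List.replicate n 0)).sum = 0 := by
  induction pat generalizing n with
  | nil => simp
  | cons p t ih =>
    cases n with
    | zero => simp
    | succ m => simp [List.replicate_succ, ih]

-- a single bucket update shifts the dot product by pat[k] * v
lemma zip_mul_set (pat : List Int) (g : List Int) (k : Nat) (v : Int)
    (hlen : g.length = pat.length) (hk : k < pat.length) :
    (List.zipWith (fun p g => p * g) pat (g.set k (g.getD k 0 + v))).sum
      = (List.zipWith (fun p g => p * g) pat g).sum + pat.getD k 0 * v := by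
  induction pat generalizing g k with
  | nil => simp at hk
  | cons p t ih =>
    cases g with
    | nil => simp at hlen
    | cons x xs =>
      cases k with
      | zero => simp; ring
      | succ m =>
        simp only [List.getD_cons_succ, List.set_cons_succ, List.zipWith_cons_cons,
          List.sum_cons]
        rw [ih xs m (by simpa using hlen) (by simp only [List.length_cons] at hk; omega)]
        ring

-- the dot product of the pattern with the evolving buckets tracks A's accumulator
lemma fold_invariant (numbers pattern : List Int) (hpat : pattern ≠ [])
    (L : List Int) (g : List Int) (hlen : g.length = pattern.length) :
    (List.zipWith (fun p g => p * g) pattern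
        (L.foldl (fun g idx =>
            let k := (PySem.Int.mod idx (pattern.length : Int)).toNat
            g.set k (g.getD k 0 + (PySem.List.pyGet? numbers idx).getD 0)) g)).sum
      = L.foldl (fun result idx =>
            let p_idx := PySem.Int.mod idx (pattern.length : Int)
            let p := (PySem.List.pyGet? pattern p_idx).getD 0
            result + ((PySem.List.pyGet? numbers idx).getD 0) * p)
          ((List.zipWith (fun p g => p * g) pattern g).sum) := by
  induction L generalizing g with
  | nil => rfl
  | cons idx L ih =>
    have hposI : (0 : Int) < (pattern.length : Int) := by
      have : pattern.length ≠ 0 := by simpa using hpat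
      omega
    have h0 : 0 ≤ PySem.Int.mod idx (pattern.length : Int) := PySem.Int.mod_nonneg idx hposI
    have hlt : PySem.Int.mod idx (pattern.length : Int) < (pattern.length : Int) :=
      PySem.Int.mod_lt idx hposI
    have hkN : (PySem.Int.mod idx (pattern.length : Int)).toNat < pattern.length := by omega
    simp only [List.foldl_cons]
    rw [ih _ (by simp [hlen])]
    congr 1
    rw [zip_mul_set pattern g _ _ hlen hkN]
    rw [PySem.List.pyGet?_eq_some_getElem pattern h0 hlt]
    simp only [Option.getD_some]
    rw [List.getD_eq_getElem pattern 0 hkN]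
    ring

theorem apply_pattern_eq (numbers pattern : List Int) (step : Int)
    (hpre : Pre_apply_pattern numbers pattern step) :
    apply_pattern numbers pattern step = apply_pattern_alt numbers pattern step := by
  rcases hpre with h | ⟨hpat, _⟩
  · -- empty loop range: both sides are |dot of zeros| % 10 = 0
    unfold apply_pattern apply_pattern_alt
    rw [PySem.List.pyRange_one_eq_nil h]
    simp [zip_mul_replicate_zero]
  · unfold apply_pattern apply_pattern_alt
    simp only []
    rw [fold_invariant numbers pattern hpat _ _ (by simp)]
    rw [zip_mul_replicate_zero]

-- ===== VERDICT (by name: the statement is the Claim_ definition above) =====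
theorem apply_pattern_spec : Claim_equal_apply_pattern := by
  intro numbers pattern step _ hpre
  unfold Spec_apply_pattern
  exact apply_pattern_eq numbers pattern step hpre
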